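-- pv_equiv track=rewrite | github.com/G10805/G1_personal | touch_aidl_w616_sop2/proprietary/commonsys/rpc/util/tool/apcc/helper.py | get_param_short_name
-- ===== SOURCE A (Python) =====
-- def get_param_short_name(i_base_name: str, prefix: str) -> str:
--     """
--     Get short name of the interface parameter.
--
--     e.g. "Wifi" -> "", "WifiChip" -> "WifiChip", "WifiStaIface" -> "StaIface".
--
--     Args:
--         i_base_name: Interface base name
--         prefix: Package prefix
--
--     Returns:
--         Short name for this interface.
--     """
--     minor_name = prefix.split(".")[-2].capitalize()
--
--     name = ""
--
--     if i_base_name.startswith(minor_name):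
--         name = i_base_name[len(minor_name):]
--         index = 0
--         cap_index = 0
--         # Strip until the second capitalized section
--         for char in name:
--             if "A" <= char <= "Z":
--                 if 2 == cap_index:
--                     name = name[:index]
--                     break
--                 cap_index += 1
--             index += 1
--     return name
-- ===== SOURCE B (Python) =====
-- def get_param_short_name(i_base_name: str, prefix: str) -> str:
--     minor_name = prefix.split(".")[-2].capitalize()
--
--     if not i_base_name.startswith(minor_name):
--         return ""
--     name = i_base_name[len(minor_name):]
--     # Segment the name: each ASCII-uppercase letter opens a new piece,
--     # pieces[0] holds whatever precedes the first uppercase letter.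
--     pieces = [""]
--     for ch in name:
--         if "A" <= ch <= "Z":
--             pieces.append(ch)
--         else:
--             pieces[-1] += ch
--     # Keeping up to the third uppercase letter = rejoining the first three pieces.
--     if len(pieces) > 3:
--         return "".join(pieces[:3])
--     return name
-- ===== Notes on version B (the rewrite author's own statement) =====
-- stated objective: alternative
-- what changed: B segments the stripped name into a list of pieces (each ASCII-uppercase letter opens a new piece) and rejoins the first three pieces, instead of A's single scan with index/cap counters and a mid-loop truncate-and-break.
import Mathlib
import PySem

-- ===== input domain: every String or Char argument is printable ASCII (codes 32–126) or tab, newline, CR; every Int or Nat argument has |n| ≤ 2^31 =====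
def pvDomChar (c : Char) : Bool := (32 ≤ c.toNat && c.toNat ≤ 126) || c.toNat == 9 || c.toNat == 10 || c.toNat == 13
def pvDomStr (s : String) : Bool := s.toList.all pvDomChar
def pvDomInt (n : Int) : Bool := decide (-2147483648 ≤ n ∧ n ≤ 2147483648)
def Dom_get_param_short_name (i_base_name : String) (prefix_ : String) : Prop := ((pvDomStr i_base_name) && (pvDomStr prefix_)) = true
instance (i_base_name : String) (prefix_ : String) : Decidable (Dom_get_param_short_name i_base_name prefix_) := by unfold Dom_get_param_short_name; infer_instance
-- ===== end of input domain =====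

-- B segments the stripped name into pieces opened at each ASCII-uppercase letter and
-- rejoins the first three, instead of A's counter-driven scan with a mid-loop break.

-- "A" <= char <= "Z"  (ASCII-only test, exactly as the Python writes it)
def pvIsUp (c : Char) : Bool := decide ('A' ≤ c ∧ c ≤ 'Z')

-- str.capitalize(): first char uppercased, rest lowercased — exact on the ASCII domain
def pvCapitalize (s : List Char) : List Char :=
  match s with
  | [] => []
  | c :: cs => PySem.Chars.upperChar c :: cs.map PySem.Chars.lowerChar

-- minor_name = prefix.split(".")[-2].capitalize()  (identical line in A and B)
def pvMinor (prefix_ : String) : List Char :=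
  pvCapitalize (PySem.List.pyGetD ((PySem.Chars.split? prefix_.toList ['.']).getD []) (-2) [])

-- ===== PORT A =====
-- A's for-loop: char-by-char scan carrying index and cap_index, break with name[:index]
def pvALoop (name : List Char) (rest : List Char) (index capIdx : Nat) : List Char :=
  match rest with
  | [] => name
  | c :: cs =>
    if pvIsUp c then
      if capIdx = 2 then name.take index   -- name[:index] (nonneg slice = take), then break
      else pvALoop name cs (index + 1) (capIdx + 1)
    else pvALoop name cs (index + 1) capIdx

def get_param_short_name (i_base_name : String) (prefix_ : String) : String :=
  let minor_name := pvMinor prefix_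
  if PySem.Chars.startswith i_base_name.toList minor_name then
    let name := PySem.List.slice i_base_name.toList (some (minor_name.length : Int)) none
    String.ofList (pvALoop name name 0 0)
  else ""

-- ===== PORT B =====
-- B's for-loop over name, building the pieces list; the accumulator keeps the pieces in
-- reverse order so that "pieces.append(ch)" / "pieces[-1] += ch" act on the head.
def pvBLoop (rest : List Char) (accRev : List (List Char)) : List (List Char) :=
  match rest with
  | [] => accRev
  | c :: cs =>
    if pvIsUp c then pvBLoop cs ([c] :: accRev)            -- pieces.append(ch)
    else
      match accRev with                                    -- pieces[-1] += ch
      | p :: rs => pvBLoop cs ((p ++ [c]) :: rs)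
      | [] => pvBLoop cs ([[c]])                           -- unreachable: acc starts nonempty

def get_param_short_name_alt (i_base_name : String) (prefix_ : String) : String :=
  let minor_name := pvMinor prefix_
  if PySem.Chars.startswith i_base_name.toList minor_name then
    let name := PySem.List.slice i_base_name.toList (some (minor_name.length : Int)) none
    let pieces := (pvBLoop name [[]]).reverse
    if 3 < pieces.length then String.ofList ((pieces.take 3).flatten)   -- "".join(pieces[:3])
    else String.ofList name
  else ""

-- ===== PRECONDITION & SPEC =====
-- Pre_ excludes exactly the inputs where A raises IndexError: prefix with no "." (split gives one part, [-2] out of range).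
def Pre_get_param_short_name (i_base_name : String) (prefix_ : String) : Prop :=
  PySem.Chars.isIn ['.'] prefix_.toList = true
instance (i_base_name : String) (prefix_ : String) : Decidable (Pre_get_param_short_name i_base_name prefix_) := by unfold Pre_get_param_short_name; infer_instance
def pvWitness_get_param_short_name : String × String := ("WifiStaIface", "android.hardware.wifi")
def Spec_get_param_short_name (i_base_name : String) (prefix_ : String) (out : String) : Prop := out = get_param_short_name_alt i_base_name prefix_
instance (i_base_name : String) (prefix_ : String) (out : String) : Decidable (Spec_get_param_short_name i_base_name prefix_ out) := by unfold Spec_get_param_short_name; infer_instance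

-- ===== CLAIM (what is proved, stated in full; the proofs are below) =====
def Claim_equal_get_param_short_name : Prop := ∀ (i_base_name : String) (prefix_ : String), Dom_get_param_short_name i_base_name prefix_ → Pre_get_param_short_name i_base_name prefix_ → Spec_get_param_short_name i_base_name prefix_ (get_param_short_name i_base_name prefix_)

-- ===== LEMMAS AND PROOFS =====

-- positions of uppercase chars (proof-side characterisation shared by both ports)
def pvUpIdxs : List Char → List Nat
  | [] => []
  | c :: cs => if pvIsUp c then 0 :: (pvUpIdxs cs).map (· + 1) else (pvUpIdxs cs).map (· + 1)

-- forward segmentation: (leading piece, pieces opened by uppercase letters)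
def pvSegsP : List Char → List Char × List (List Char)
  | [] => ([], [])
  | c :: cs =>
    let r := pvSegsP cs
    if pvIsUp c then ([], (c :: r.1) :: r.2) else (c :: r.1, r.2)

theorem pv_getD_map_succ (l : List Nat) (k : Nat) (hk : k < l.length) :
    (l.map (· + 1)).getD k 0 = l.getD k 0 + 1 := by
  simp [List.getD, hk]

theorem pvALoop_eq (rest : List Char) : ∀ (name : List Char) (index capIdx : Nat), capIdx ≤ 2 →
    pvALoop name rest index capIdx =
      if 3 - capIdx ≤ (pvUpIdxs rest).length then
        name.take (index + (pvUpIdxs rest).getD (2 - capIdx) 0)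
      else name := by
  induction rest with
  | nil => intro name index capIdx h; simp [pvALoop, pvUpIdxs]; omega
  | cons c cs ih =>
    intro name index capIdx h
    simp only [pvALoop]
    by_cases hu : pvIsUp c
    · have hU : pvUpIdxs (c :: cs) = 0 :: (pvUpIdxs cs).map (· + 1) := by
        simp [pvUpIdxs, hu]
      rw [hU]
      simp only [hu, if_true]
      by_cases h2 : capIdx = 2
      · subst h2; simp
      · have hlt : capIdx + 1 ≤ 2 := by omega
        rw [if_neg h2, ih name (index + 1) (capIdx + 1) hlt]
        have h21 : 2 - capIdx = (2 - (capIdx + 1)) + 1 := by omega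
        by_cases hc : 3 - (capIdx + 1) ≤ (pvUpIdxs cs).length
        · rw [if_pos hc, if_pos (by simp; omega), h21, List.getD_cons_succ,
            pv_getD_map_succ _ _ (by omega)]
          have : index + 1 + (pvUpIdxs cs).getD (2 - (capIdx + 1)) 0
               = index + ((pvUpIdxs cs).getD (2 - (capIdx + 1)) 0 + 1) := by omega
          rw [this]
        · rw [if_neg hc, if_neg (by simp; omega)]
    · have hU : pvUpIdxs (c :: cs) = (pvUpIdxs cs).map (· + 1) := by
        simp [pvUpIdxs, hu]
      rw [hU]
      simp only [hu]
      rw [if_neg (by simp), ih name (index + 1) capIdx h]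
      by_cases hc : 3 - capIdx ≤ (pvUpIdxs cs).length
      · rw [if_pos hc, if_pos (by simpa using hc), pv_getD_map_succ _ _ (by omega)]
        have : index + 1 + (pvUpIdxs cs).getD (2 - capIdx) 0
             = index + ((pvUpIdxs cs).getD (2 - capIdx) 0 + 1) := by omega
        rw [this]
      · rw [if_neg hc, if_neg (by simpa using hc)]

-- B's reversed fold computes pvSegsP, with the pending piece p glued onto the leading segment
theorem pvBLoop_eq (l : List Char) : ∀ (p : List Char) (acc : List (List Char)),
    pvBLoop l (p :: acc) =
      (((p ++ (pvSegsP l).1) :: (pvSegsP l).2).reverse) ++ acc := by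
  induction l with
  | nil => intro p acc; simp [pvBLoop, pvSegsP]
  | cons c cs ih =>
    intro p acc
    simp only [pvBLoop, pvSegsP]
    by_cases hu : pvIsUp c
    · simp only [hu, if_true]
      rw [ih [c] (p :: acc)]
      simp
    · simp only [hu, if_false, Bool.false_eq_true]
      rw [ih (p ++ [c]) acc]
      simp

theorem pvSegs_len (l : List Char) : ((pvSegsP l).2).length = (pvUpIdxs l).length := by
  induction l with
  | nil => simp [pvSegsP, pvUpIdxs]
  | cons c cs ih =>
    simp only [pvSegsP, pvUpIdxs]
    by_cases hu : pvIsUp c <;> simp [hu, ih]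

theorem pvSegs_take (l : List Char) : ∀ (k : Nat), k < (pvUpIdxs l).length →
    ((((pvSegsP l).1 :: (pvSegsP l).2).take (k + 1)).flatten)
      = l.take ((pvUpIdxs l).getD k 0) := by
  induction l with
  | nil => simp [pvUpIdxs]
  | cons c cs ih =>
    intro k hk
    simp only [pvSegsP, pvUpIdxs] at *
    by_cases hu : pvIsUp c
    · simp only [hu, if_true] at hk ⊢
      match k with
      | 0 => simp
      | k + 1 =>
        have hk' : k < (pvUpIdxs cs).length := by simpa using hk
        have := ih k hk'
        rw [List.getD_cons_succ, pv_getD_map_succ _ _ hk']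
        simp only [List.take_succ_cons, List.flatten_cons] at this ⊢
        simp [this]
    · simp only [hu, if_false, Bool.false_eq_true] at hk ⊢
      have hk' : k < (pvUpIdxs cs).length := by simpa using hk
      have := ih k hk'
      rw [pv_getD_map_succ _ _ hk']
      simp only [List.take_succ_cons, List.flatten_cons] at this ⊢
      simp [this]

-- ===== VERDICT (by name: the statement is the Claim_ definition above) =====
theorem get_param_short_name_spec : Claim_equal_get_param_short_name := by
  intro i_base_name prefix_ _ _
  unfold Spec_get_param_short_name get_param_short_name get_param_short_name_alt
  by_cases hs : PySem.Chars.startswith i_base_name.toList (pvMinor prefix_)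
  · simp only [hs, if_true]
    set name := PySem.List.slice i_base_name.toList (some ((pvMinor prefix_).length : Int)) none with hname
    rw [pvALoop_eq name name 0 0 (by omega)]
    have hB : (pvBLoop name [[]]).reverse = (pvSegsP name).1 :: (pvSegsP name).2 := by
      rw [pvBLoop_eq name [] []]
      simp
    rw [hB]
    have hlen : ((pvSegsP name).1 :: (pvSegsP name).2).length = (pvUpIdxs name).length + 1 := by
      simp [pvSegs_len]
    by_cases hc : 3 ≤ (pvUpIdxs name).length
    · rw [if_pos (by omega), if_pos (by omega)]
      rw [pvSegs_take name 2 (by omega)]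
      simp
    · rw [if_neg (by omega), if_neg (by omega)]
  · simp [hs]
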